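-- pv_equiv track=rewrite | github.com/SHABRAWii/steps-forecast | src/models/instances/torch_regressors.py | _detect_sequence_from_columns
-- ===== SOURCE A (Python) =====
-- from typing import Optional, List, Tuple, Dict
--
-- def _detect_sequence_from_columns(columns: List[str]) -> Tuple[Optional[List[int]], Optional[List[int]]]:
--     """
--     Try to detect lag sequence columns like steps_lag1..steps_lag64.
--     Returns (seq_idx, static_idx): index arrays for sequence and static features.
--     """
--     seq_idx = []
--     for i, c in enumerate(columns):
--         # customize patterns if needed
--         if c.startswith("steps_lag"):
--             try:
--                 # sort by increasing lag number (lag1, lag2, ...)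
--                 lag = int(c.replace("steps_lag", ""))
--                 seq_idx.append((i, lag))
--             except Exception:
--                 pass
--     if not seq_idx:
--         return None, None
--     # sort by lag so the sequence is [lag1, lag2, ... lagN]
--     seq_idx = [i for (i, _) in sorted(seq_idx, key=lambda x: x[1])]
--     static_idx = [i for i in range(len(columns)) if i not in seq_idx]
--     return seq_idx, static_idx
-- ===== SOURCE B (Python) =====
-- def _detect_sequence_from_columns(columns):
--     # One partitioning pass: collect (index, lag) pairs and static indices together,
--     # then sort the pairs by lag. A instead detects, sorts, and rescans the full
--     # index range testing membership in the sorted sequence list.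
--     pairs = []
--     static_idx = []
--     for i, c in enumerate(columns):
--         lag = None
--         if c.startswith("steps_lag"):
--             try:
--                 lag = int(c.replace("steps_lag", ""))
--             except ValueError:
--                 lag = None
--         if lag is None:
--             static_idx.append(i)
--         else:
--             pairs.append((i, lag))
--     if not pairs:
--         return None, None
--     pairs.sort(key=lambda p: p[1])
--     return [i for (i, _) in pairs], static_idx
-- ===== Notes on version B (the rewrite author's own statement) =====
-- stated objective: simpler
-- what changed: One partitioning pass over enumerate(columns) that builds the (index, lag) pairs and the static index list together, then sorts the pairs by lag, replacing A's detect-then-sort-then-rescan of range(len(columns)) with membership tests against the sequence list.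
import Mathlib
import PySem

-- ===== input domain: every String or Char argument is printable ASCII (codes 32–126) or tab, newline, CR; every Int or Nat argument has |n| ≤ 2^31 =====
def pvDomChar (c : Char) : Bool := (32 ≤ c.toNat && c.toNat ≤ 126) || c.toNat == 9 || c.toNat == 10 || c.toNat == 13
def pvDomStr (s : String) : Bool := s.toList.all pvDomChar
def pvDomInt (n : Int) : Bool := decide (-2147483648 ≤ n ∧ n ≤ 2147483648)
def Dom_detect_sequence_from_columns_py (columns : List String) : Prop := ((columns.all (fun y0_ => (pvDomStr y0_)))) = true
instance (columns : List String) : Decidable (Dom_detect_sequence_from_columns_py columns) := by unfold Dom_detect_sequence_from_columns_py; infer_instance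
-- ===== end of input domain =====

-- B replaces A's detect-then-sort-then-complement-rescan with a single partitioning
-- pass that builds the (index, lag) pairs and the static index list together (objective: simpler).


-- ===== PORT A =====
-- A: collect (i, lag) pairs for parsable "steps_lag…" columns; if none, (None, None);
-- else sort by lag, take the indices, and rescan range(len(columns)) for the complement.
def detect_sequence_from_columns_py (columns : List String) : Option (List Int) × Option (List Int) :=
  let seq_idx : List (Int × Int) :=
    (PySem.List.enumerate columns).foldl
      (fun acc p =>
        if PySem.Str.startswith p.2 "steps_lag" then
          match PySem.Int.ofStr? (PySem.Str.replace p.2 "steps_lag" "") with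
          | some lag => acc ++ [(p.1, lag)]
          | none => acc
        else acc) []
  if seq_idx = [] then (none, none)
  else
    let seq_idx' : List Int :=
      (PySem.List.sorted seq_idx (fun x => x.2) false).map (fun x => x.1)
    let static_idx : List Int :=
      (PySem.List.pyRange 0 (PySem.List.len columns) 1).filter (fun i => decide (i ∉ seq_idx'))
    (some seq_idx', some static_idx)

-- ===== PORT B =====
-- B: one pass partitioning enumerate(columns) into (i, lag) pairs and static indices,
-- then sort the pairs by lag.
def detect_sequence_from_columns_py_alt (columns : List String) : Option (List Int) × Option (List Int) :=
  let st : List (Int × Int) × List Int :=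
    (PySem.List.enumerate columns).foldl
      (fun st p =>
        let lag : Option Int :=
          if PySem.Str.startswith p.2 "steps_lag" then
            PySem.Int.ofStr? (PySem.Str.replace p.2 "steps_lag" "")
          else none
        match lag with
        | none => (st.1, st.2 ++ [p.1])
        | some l => (st.1 ++ [(p.1, l)], st.2)) ([], [])
  if st.1 = [] then (none, none)
  else
    (some ((PySem.List.sorted st.1 (fun x => x.2) false).map (fun x => x.1)), some st.2)

-- ===== PRECONDITION & SPEC =====
def Spec_detect_sequence_from_columns_py (columns : List String) (out : Option (List Int) × Option (List Int)) : Prop := out = detect_sequence_from_columns_py_alt columns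
instance (columns : List String) (out : Option (List Int) × Option (List Int)) : Decidable (Spec_detect_sequence_from_columns_py columns out) := by unfold Spec_detect_sequence_from_columns_py; infer_instance

-- ===== CLAIM (what is proved, stated in full; the proofs are below) =====
def Claim_equal_detect_sequence_from_columns_py : Prop := ∀ (columns : List String), Dom_detect_sequence_from_columns_py columns → Spec_detect_sequence_from_columns_py columns (detect_sequence_from_columns_py columns)

-- ===== LEMMAS AND PROOFS =====

-- the per-column parse both programs perform
def pvParse (c : String) : Option Int :=
  if PySem.Str.startswith c "steps_lag" then
    PySem.Int.ofStr? (PySem.Str.replace c "steps_lag" "")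
  else none

-- the matched pair a column contributes, if any
def pvPair (p : Int × String) : Option (Int × Int) :=
  (pvParse p.2).map (fun lag => (p.1, lag))

theorem pvA_fold (l : List (Int × String)) (acc : List (Int × Int)) :
    l.foldl
      (fun acc p =>
        if PySem.Str.startswith p.2 "steps_lag" then
          match PySem.Int.ofStr? (PySem.Str.replace p.2 "steps_lag" "") with
          | some lag => acc ++ [(p.1, lag)]
          | none => acc
        else acc) acc
    = acc ++ l.filterMap pvPair := by
  induction l generalizing acc with
  | nil => simp
  | cons p t ih =>
    rw [List.foldl_cons, List.filterMap_cons]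
    by_cases h : PySem.Str.startswith p.2 "steps_lag"
    · rw [if_pos h]
      cases hp : PySem.Int.ofStr? (PySem.Str.replace p.2 "steps_lag" "") with
      | none =>
        rw [ih]
        have : pvPair p = none := by unfold pvPair pvParse; rw [if_pos h, hp]; rfl
        rw [this]
      | some lag =>
        rw [ih]
        have : pvPair p = some (p.1, lag) := by unfold pvPair pvParse; rw [if_pos h, hp]; rfl
        rw [this]
        simp
    · rw [if_neg h, ih]
      have : pvPair p = none := by unfold pvPair pvParse; rw [if_neg h]; rfl
      rw [this]

theorem pvB_fold (l : List (Int × String)) (a1 : List (Int × Int)) (a2 : List Int) :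
    l.foldl
      (fun st p =>
        let lag : Option Int :=
          if PySem.Str.startswith p.2 "steps_lag" then
            PySem.Int.ofStr? (PySem.Str.replace p.2 "steps_lag" "")
          else none
        match lag with
        | none => (st.1, st.2 ++ [p.1])
        | some l => (st.1 ++ [(p.1, l)], st.2)) (a1, a2)
    = (a1 ++ l.filterMap pvPair,
       a2 ++ (l.filter (fun p => (pvParse p.2).isNone)).map (fun p => p.1)) := by
  induction l generalizing a1 a2 with
  | nil => simp
  | cons p t ih =>
    rw [List.foldl_cons, List.filterMap_cons, List.filter_cons]
    show List.foldl _ (match pvParse p.2 with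
      | none => ((a1, a2).1, (a1, a2).2 ++ [p.1])
      | some l => ((a1, a2).1 ++ [(p.1, l)], (a1, a2).2)) t = _
    cases hp : pvParse p.2 with
    | none =>
      have h2 : pvPair p = none := by simp [pvPair, hp]
      rw [h2, ih]
      simp
    | some lag =>
      have h2 : pvPair p = some (p.1, lag) := by simp [pvPair, hp]
      rw [h2, ih]
      simp

-- in a list whose first components are strictly increasing, equal firsts force equal pairs
theorem pvFst_inj {l : List (Int × String)} (hpw : l.Pairwise (fun a b => a.1 < b.1))
    {p q : Int × String} (hp : p ∈ l) (hq : q ∈ l) (h : p.1 = q.1) : p = q := by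
  induction l with
  | nil => cases hp
  | cons a t ih =>
    rcases List.pairwise_cons.1 hpw with ⟨ha, ht⟩
    rcases List.mem_cons.1 hp with rfl | hp' <;> rcases List.mem_cons.1 hq with rfl | hq'
    · rfl
    · exact absurd h (ne_of_lt (ha q hq'))
    · exact absurd h.symm (ne_of_lt (ha p hp'))
    · exact ih ht hp' hq'

-- an enumerated column's index is among the matched indices iff its column parses
theorem pvMem_matched (columns : List String) (p : Int × String)
    (hp : p ∈ PySem.List.enumerate columns) :
    (p.1 ∈ ((PySem.List.enumerate columns).filterMap pvPair).map (fun x => x.1))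
      ↔ (pvParse p.2).isSome := by
  constructor
  · intro h
    rcases List.mem_map.1 h with ⟨x, hx, hfst⟩
    rcases List.mem_filterMap.1 hx with ⟨q, hq, hqx⟩
    cases hv : pvParse q.2 with
    | none => simp [pvPair, hv] at hqx
    | some lag =>
      have hx' : x = (q.1, lag) := by
        simp [pvPair, hv] at hqx; exact hqx.symm
      have : q = p := pvFst_inj (PySem.List.pairwise_lt_enumerate columns 0) hq hp
        (by rw [hx'] at hfst; exact hfst)
      subst this
      simp [hv]
  · intro h
    cases hv : pvParse p.2 with
    | none => simp [hv] at h
    | some lag =>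
      exact List.mem_map.2 ⟨(p.1, lag),
        List.mem_filterMap.2 ⟨p, hp, by simp [pvPair, hv]⟩, rfl⟩

-- ===== VERDICT (by name: the statement is the Claim_ definition above) =====
theorem detect_sequence_from_columns_py_spec : Claim_equal_detect_sequence_from_columns_py := by
  intro columns _
  show detect_sequence_from_columns_py columns = detect_sequence_from_columns_py_alt columns
  rw [detect_sequence_from_columns_py, detect_sequence_from_columns_py_alt]
  rw [pvA_fold, pvB_fold, List.nil_append, List.nil_append]
  by_cases hnil : (PySem.List.enumerate columns).filterMap pvPair = []
  · simp [hnil]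
  · rw [if_neg hnil, if_neg hnil]
    refine Prod.ext rfl ?_
    show some _ = some _
    congr 1
    -- A's complement rescan equals B's static list
    have hperm : ((PySem.List.sorted ((PySem.List.enumerate columns).filterMap pvPair)
        (fun x => x.2) false).map (fun x => x.1)).Perm
        (((PySem.List.enumerate columns).filterMap pvPair).map (fun x => x.1)) :=
      (PySem.List.sorted_perm _ _ _).map _
    have hmem : ∀ i : Int,
        (i ∈ (PySem.List.sorted ((PySem.List.enumerate columns).filterMap pvPair)
          (fun x => x.2) false).map (fun x => x.1)) ↔
        (i ∈ ((PySem.List.enumerate columns).filterMap pvPair).map (fun x => x.1)) :=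
      fun i => hperm.mem_iff
    have hrange : PySem.List.pyRange 0 (PySem.List.len columns) 1
        = (PySem.List.enumerate columns).map (fun x => x.1) := by
      rw [PySem.List.map_fst_enumerate]
      norm_num [PySem.List.len_eq]
    rw [hrange]
    rw [List.filter_map]
    have hfil : (PySem.List.enumerate columns).filter
        ((fun i => decide (i ∉ (PySem.List.sorted ((PySem.List.enumerate columns).filterMap pvPair)
          (fun x => x.2) false).map (fun x => x.1))) ∘ (fun x => x.1))
        = (PySem.List.enumerate columns).filter (fun p => (pvParse p.2).isNone) := by
      apply List.filter_congr
      intro p hp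
      have := pvMem_matched columns p hp
      simp only [Function.comp] at *
      cases hv : pvParse p.2 with
      | none => simp [hmem, this, hv]
      | some lag => simp [hmem, this, hv]
    rw [hfil]
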